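-- pv_equiv track=rewrite | github.com/EMAT31530/ai-group-project-group-2 | Search/EntropySearch/calculate_entropy.py | filter_uncommon_letters
-- ===== SOURCE A (Python) =====
-- def filter_uncommon_letters(word_list):
--     word_list = [w for w in word_list if "q" not in w]
--     word_list = [w for w in word_list if "j" not in w]
--     word_list = [w for w in word_list if "w" not in w]
--     word_list = [w for w in word_list if "z" not in w]
--     word_list = [w for w in word_list if "g" not in w]
--     word_list = [w for w in word_list if "f" not in w]
--     word_list = [w for w in word_list if "k" not in w]
--     return word_list
-- ===== SOURCE B (Python) =====
-- UNCOMMON = frozenset("qjwzgfk")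
--
-- def filter_uncommon_letters(word_list):
--     return [w for w in word_list if not any(c in UNCOMMON for c in w)]
-- ===== Notes on version B (the rewrite author's own statement) =====
-- stated objective: simpler
-- what changed: Replaces seven sequential filtering passes (one per uncommon letter) with a single pass that keeps a word iff none of its characters is in a fixed uncommon-letter set.
import Mathlib
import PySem

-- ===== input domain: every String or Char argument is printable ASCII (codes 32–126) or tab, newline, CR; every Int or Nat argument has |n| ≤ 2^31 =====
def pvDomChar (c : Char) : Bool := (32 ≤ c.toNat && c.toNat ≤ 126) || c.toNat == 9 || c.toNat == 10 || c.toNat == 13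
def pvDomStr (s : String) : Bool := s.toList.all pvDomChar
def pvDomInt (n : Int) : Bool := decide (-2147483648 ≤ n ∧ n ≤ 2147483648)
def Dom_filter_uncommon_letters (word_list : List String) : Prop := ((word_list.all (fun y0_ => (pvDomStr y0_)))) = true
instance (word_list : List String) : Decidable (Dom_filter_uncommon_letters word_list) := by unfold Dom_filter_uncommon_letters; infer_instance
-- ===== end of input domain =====

-- B replaces A's seven sequential filtering passes with one pass over the list using a fixed uncommon-letter set (objective: simpler).
-- ===== PORT A =====
def filter_uncommon_letters (word_list : List String) : List String :=
  let word_list := word_list.filter (fun w => !(PySem.Str.isIn "q" w))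
  let word_list := word_list.filter (fun w => !(PySem.Str.isIn "j" w))
  let word_list := word_list.filter (fun w => !(PySem.Str.isIn "w" w))
  let word_list := word_list.filter (fun w => !(PySem.Str.isIn "z" w))
  let word_list := word_list.filter (fun w => !(PySem.Str.isIn "g" w))
  let word_list := word_list.filter (fun w => !(PySem.Str.isIn "f" w))
  let word_list := word_list.filter (fun w => !(PySem.Str.isIn "k" w))
  word_list

-- ===== PORT B =====
-- UNCOMMON = frozenset("qjwzgfk")
def pvUncommon : PySem.Set Char := PySem.Set.ofList "qjwzgfk".toList

def filter_uncommon_letters_alt (word_list : List String) : List String :=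
  word_list.filter (fun w => !(w.toList.any (fun c => pvUncommon.contains c)))

-- ===== PRECONDITION & SPEC =====
def Spec_filter_uncommon_letters (word_list : List String) (out : List String) : Prop := out = filter_uncommon_letters_alt word_list
instance (word_list : List String) (out : List String) : Decidable (Spec_filter_uncommon_letters word_list out) := by unfold Spec_filter_uncommon_letters; infer_instance

-- ===== CLAIM (what is proved, stated in full; the proofs are below) =====
def Claim_equal_filter_uncommon_letters : Prop := ∀ (word_list : List String), Dom_filter_uncommon_letters word_list → Spec_filter_uncommon_letters word_list (filter_uncommon_letters word_list)

-- ===== LEMMAS AND PROOFS =====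

-- ===== VERDICT (by name: the statement is the Claim_ definition above) =====
theorem one_char_isIn (c : Char) (w : String) :
    PySem.Str.isIn (String.ofList [c]) w = w.toList.contains c := by
  rw [Bool.eq_iff_iff, PySem.Str.isIn_iff_infix]
  simp [List.singleton_infix_iff]

theorem filter_uncommon_letters_spec : Claim_equal_filter_uncommon_letters := by
  intro word_list _
  show filter_uncommon_letters word_list = filter_uncommon_letters_alt word_list
  unfold filter_uncommon_letters filter_uncommon_letters_alt
  simp only [List.filter_filter]
  apply List.filter_congr
  intro w _
  have hq := one_char_isIn 'q' w
  have hj := one_char_isIn 'j' w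
  have hw := one_char_isIn 'w' w
  have hz := one_char_isIn 'z' w
  have hg := one_char_isIn 'g' w
  have hf := one_char_isIn 'f' w
  have hk := one_char_isIn 'k' w
  simp only [show ("q" : String) = String.ofList ['q'] from rfl,
    show ("j" : String) = String.ofList ['j'] from rfl,
    show ("w" : String) = String.ofList ['w'] from rfl,
    show ("z" : String) = String.ofList ['z'] from rfl,
    show ("g" : String) = String.ofList ['g'] from rfl,
    show ("f" : String) = String.ofList ['f'] from rfl,
    show ("k" : String) = String.ofList ['k'] from rfl,
    hq, hj, hw, hz, hg, hf, hk]
  simp [pvUncommon, PySem.Set.ofList, PySem.Set.contains]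
  rw [Bool.eq_iff_iff]
  simp
  constructor
  · rintro ⟨h1,h2,h3,h4,h5,h6,h7⟩ x hx
    exact ⟨fun e => h7 (e ▸ hx), fun e => h6 (e ▸ hx), fun e => h5 (e ▸ hx),
      fun e => h4 (e ▸ hx), fun e => h3 (e ▸ hx), fun e => h2 (e ▸ hx), fun e => h1 (e ▸ hx)⟩
  · intro h
    exact ⟨fun hx => (h _ hx).2.2.2.2.2.2 rfl, fun hx => (h _ hx).2.2.2.2.2.1 rfl,
      fun hx => (h _ hx).2.2.2.2.1 rfl, fun hx => (h _ hx).2.2.2.1 rfl,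
      fun hx => (h _ hx).2.2.1 rfl, fun hx => (h _ hx).2.1 rfl, fun hx => (h _ hx).1 rfl⟩
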